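-- pv_equiv track=rewrite | github.com/danilo-araujo0000/RLA-Registro-de-Limpeza | registro/views.py | extrair_nome_abreviado
-- ===== SOURCE A (Python) =====
-- def extrair_nome_abreviado(nome_completo):
--     if not nome_completo:
--         return ''
--
--     partes_nome = nome_completo.split()
--     preposicoes = ['de', 'da', 'do', 'dos', 'das']
--     nome_abreviado_partes = [partes_nome[0]]
--
--
--     for i in range(1, len(partes_nome)):
--         nome_abreviado_partes.append(partes_nome[i])
--         if partes_nome[i].lower() not in preposicoes:
--             break
--
--     return ' '.join(nome_abreviado_partes)
-- ===== SOURCE B (Python) =====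
-- def _resto(ws):
--     if not ws:
--         return ''
--     if ws[0].lower() in ('de', 'da', 'do', 'dos', 'das'):
--         return ' ' + ws[0] + _resto(ws[1:])
--     return ' ' + ws[0]
--
--
-- def extrair_nome_abreviado(nome_completo):
--     partes = nome_completo.split()
--     if not partes:
--         return ''
--     return partes[0] + _resto(partes[1:])
-- ===== Notes on version B (the rewrite author's own statement) =====
-- stated objective: alternative
-- what changed: Replaces A's index loop that appends words to a list with a break and then joins, by structural recursion on the tail of the word list that builds the result string directly by concatenation (no index arithmetic, no intermediate list, no join); Pre_ excludes whitespace-only non-empty strings, on which A raises IndexError while B returns ''.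
-- outside the precondition, e.g. on extrair_nome_abreviado(' '): A raises IndexError, B returns ''
-- crash fix: On whitespace-only non-empty strings (e.g. ' ') A raises IndexError from partes_nome[0]; B returns ''. — e.g. on extrair_nome_abreviado(" "): A raises IndexError, B returns ""
import Mathlib
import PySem

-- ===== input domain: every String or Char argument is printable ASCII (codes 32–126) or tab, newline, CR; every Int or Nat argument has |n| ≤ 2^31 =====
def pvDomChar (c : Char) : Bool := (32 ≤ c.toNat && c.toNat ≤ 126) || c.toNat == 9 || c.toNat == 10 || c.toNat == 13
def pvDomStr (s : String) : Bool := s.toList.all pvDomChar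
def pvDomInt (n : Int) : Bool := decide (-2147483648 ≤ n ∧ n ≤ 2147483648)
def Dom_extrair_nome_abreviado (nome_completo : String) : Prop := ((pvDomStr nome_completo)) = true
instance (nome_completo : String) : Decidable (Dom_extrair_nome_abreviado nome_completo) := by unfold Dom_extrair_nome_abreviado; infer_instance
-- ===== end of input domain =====

-- B replaces A's index loop (append to a list, break, then join) by structural recursion on the word
-- list tail, concatenating the result string directly; on whitespace-only non-empty input A raises
-- IndexError while B returns '' (outside Pre_, see Raises_).

-- ===== PORT A =====
-- the for-loop over range(1, len(partes)): append partes[i], break when it is not a preposition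
def pvLoopA (partes preps : List String) : List Int → List String → List String
  | [], acc => acc
  | i :: is, acc =>
    let acc' := acc ++ [PySem.List.pyGetD partes i ""]
    if PySem.Str.lower (PySem.List.pyGetD partes i "") ∈ preps then
      pvLoopA partes preps is acc'
    else acc'

def extrair_nome_abreviado (nome_completo : String) : String :=
  if nome_completo = "" then ""
  else
    let partes := PySem.Str.split₀ nome_completo
    let preps := ["de", "da", "do", "dos", "das"]
    -- partes_nome[0]: IndexError (pyGet? = none) exactly when partes = [], excluded by Pre_
    let first := (PySem.List.pyGet? partes 0).getD ""
    PySem.Str.join " " (pvLoopA partes preps (PySem.List.pyRange 1 (partes.length : Int) 1) [first])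

-- ===== PORT B =====
-- _resto(ws): '' on empty; ' ' + ws[0] + _resto(ws[1:]) while ws[0] is a preposition, else ' ' + ws[0].
-- Python's str + is ported as String append (exact: concatenation of the code points).
def pvResto : List String → String
  | [] => ""
  | w :: rest =>
    if PySem.Str.lower w ∈ ["de", "da", "do", "dos", "das"] then " " ++ w ++ pvResto rest
    else " " ++ w

def extrair_nome_abreviado_alt (nome_completo : String) : String :=
  let partes := PySem.Str.split₀ nome_completo
  if partes = [] then ""
  else (PySem.List.pyGetD partes 0 "") ++ pvResto (PySem.List.slice partes (some 1) none)

-- ===== PRECONDITION & SPEC =====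
-- Pre_ excludes exactly the whitespace-only non-empty strings, on which A raises IndexError (partes_nome[0] of an empty split).
def Pre_extrair_nome_abreviado (nome_completo : String) : Prop :=
  nome_completo = "" ∨ PySem.Str.split₀ nome_completo ≠ []
instance (nome_completo : String) : Decidable (Pre_extrair_nome_abreviado nome_completo) := by
  unfold Pre_extrair_nome_abreviado; infer_instance

def pvWitness_extrair_nome_abreviado : String := "Maria de Souza Lima"

-- On whitespace-only non-empty strings A raises IndexError; B returns ''.
def Raises_extrair_nome_abreviado (nome_completo : String) : Prop :=
  nome_completo ≠ "" ∧ PySem.Str.split₀ nome_completo = []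
instance (nome_completo : String) : Decidable (Raises_extrair_nome_abreviado nome_completo) := by
  unfold Raises_extrair_nome_abreviado; infer_instance
def pvRaiseWitness_extrair_nome_abreviado : String := " "
def pvRaiseWitnessOut_extrair_nome_abreviado : String := ""

def Spec_extrair_nome_abreviado (nome_completo : String) (out : String) : Prop := out = extrair_nome_abreviado_alt nome_completo
instance (nome_completo : String) (out : String) : Decidable (Spec_extrair_nome_abreviado nome_completo out) := by unfold Spec_extrair_nome_abreviado; infer_instance

-- ===== CLAIM (what is proved, stated in full; the proofs are below) =====
def Claim_equal_extrair_nome_abreviado : Prop := ∀ (nome_completo : String), Dom_extrair_nome_abreviado nome_completo → Pre_extrair_nome_abreviado nome_completo → Spec_extrair_nome_abreviado nome_completo (extrair_nome_abreviado nome_completo)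

def Claim_raises_extrair_nome_abreviado : Prop := (∀ (nome_completo : String), Dom_extrair_nome_abreviado nome_completo → Raises_extrair_nome_abreviado nome_completo → ¬ Pre_extrair_nome_abreviado nome_completo) ∧ (Dom_extrair_nome_abreviado (pvRaiseWitness_extrair_nome_abreviado) ∧ Raises_extrair_nome_abreviado (pvRaiseWitness_extrair_nome_abreviado) ∧ extrair_nome_abreviado_alt (pvRaiseWitness_extrair_nome_abreviado) = pvRaiseWitnessOut_extrair_nome_abreviado)

-- ===== LEMMAS AND PROOFS =====

-- the words both versions collect after the first: leading prepositions plus the first non-preposition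
def pvGrab (preps : List String) : List String → List String
  | [] => []
  | x :: xs => if PySem.Str.lower x ∈ preps then x :: pvGrab preps xs else [x]

theorem pvLoopA_eq_grab (partes preps : List String) :
    ∀ (i : Nat) (acc : List String),
      pvLoopA partes preps (PySem.List.pyRange (i : Int) (partes.length : Int) 1) acc
        = acc ++ pvGrab preps (partes.drop i) := by
  intro i
  induction h : partes.length - i generalizing i with
  | zero =>
    intro acc
    have hge : partes.length ≤ i := by omega
    rw [PySem.List.pyRange_one_eq_nil (by exact_mod_cast hge)]
    simp [pvLoopA, List.drop_eq_nil_of_le hge, pvGrab]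
  | succ k ih =>
    intro acc
    have hlt : i < partes.length := by omega
    rw [PySem.List.pyRange_one_cons (by exact_mod_cast hlt)]
    simp only [pvLoopA, PySem.List.pyGetD_natCast, List.getD_eq_getElem?_getD,
      List.getElem?_eq_getElem hlt, Option.getD_some]
    rw [List.drop_eq_getElem_cons hlt]
    simp only [pvGrab]
    split_ifs with hp
    · have hc : ((i:Int)+1) = ((i+1 : Nat) : Int) := by push_cast; ring
      rw [hc, ih (i+1) (by omega)]
      simp
    · simp

-- joining p0 :: (the grabbed words) with ' ' is exactly p0 followed by B's recursive string
theorem pvIc_singleton (a : List Char) : [' '].intercalate [a] = a := by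
  simp [List.intercalate]

theorem pvIc_cons (a b : List Char) (l : List (List Char)) :
    [' '].intercalate (a :: b :: l) = a ++ ' ' :: [' '].intercalate (b :: l) := by
  simp [List.intercalate, List.intersperse]

theorem join_grab_eq_resto (rest : List String) (p0 : String) :
    PySem.Str.join " " (p0 :: pvGrab ["de", "da", "do", "dos", "das"] rest)
      = p0 ++ pvResto rest := by
  induction rest generalizing p0 with
  | nil =>
    apply String.ext
    simp only [pvGrab, pvResto, PySem.Str.toList_join, PySem.Chars.join, List.map_cons,
      List.map_nil, String.toList_append]
    rw [show " ".toList = [' '] from rfl, pvIc_singleton]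
    simp
  | cons w ws ih =>
    simp only [pvGrab, pvResto]
    split_ifs with hp
    · have hih := ih w
      apply String.ext
      apply_fun String.toList at hih
      simp only [PySem.Str.toList_join, String.toList_append, PySem.Chars.join,
        List.map_cons] at hih ⊢
      rw [show " ".toList = [' '] from rfl] at hih ⊢
      rw [pvIc_cons]
      simp [hih]
    · apply String.ext
      simp only [PySem.Str.toList_join, String.toList_append, PySem.Chars.join, List.map_cons,
        List.map_nil]
      rw [show " ".toList = [' '] from rfl, pvIc_cons, pvIc_singleton]
      simp

-- ===== VERDICT (by name: the statement is the Claim_ definition above) =====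
theorem extrair_nome_abreviado_spec : Claim_equal_extrair_nome_abreviado := by
  intro nome _ hpre
  unfold Spec_extrair_nome_abreviado extrair_nome_abreviado extrair_nome_abreviado_alt
  by_cases h0 : nome = ""
  · subst h0; decide
  · have hne : PySem.Str.split₀ nome ≠ [] := hpre.resolve_left h0
    simp only [if_neg h0, if_neg hne]
    set partes := PySem.Str.split₀ nome with hpartes
    obtain ⟨p0, rest, hp⟩ : ∃ p0 rest, partes = p0 :: rest := by
      cases hcc : partes with
      | nil => exact absurd hcc hne
      | cons a b => exact ⟨a, b, rfl⟩
    have hA := pvLoopA_eq_grab partes ["de", "da", "do", "dos", "das"] 1 [(PySem.List.pyGet? partes 0).getD ""]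
    push_cast at hA
    rw [hA, hp]
    have hget : (PySem.List.pyGet? (p0 :: rest) 0).getD "" = p0 := by
      simp [PySem.List.pyGet?, PySem.List.pyIdx?]
    have hgetD : PySem.List.pyGetD (p0 :: rest) 0 "" = p0 := by
      simp [PySem.List.pyGetD, PySem.List.pyGet?, PySem.List.pyIdx?]
    have hslice : PySem.List.slice (p0 :: rest) (some 1) none = rest := by
      rw [PySem.List.slice_from (p0 :: rest) (by simp)]
      simp
    rw [hget, hgetD, hslice]
    simpa using join_grab_eq_resto rest p0

theorem extrair_nome_abreviado_raises : Claim_raises_extrair_nome_abreviado := by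
  unfold Claim_raises_extrair_nome_abreviado
  refine ⟨?_, by decide⟩
  rintro s _ ⟨hne, hnil⟩ (h1 | h2)
  · exact hne h1
  · exact h2 hnil

-- self-check: the raise-witness value recorded above is indeed what port B returns (read off the raises theorem)
theorem pvRaiseWitness_extrair_nome_abreviado_ok :
    extrair_nome_abreviado_alt pvRaiseWitness_extrair_nome_abreviado
      = pvRaiseWitnessOut_extrair_nome_abreviado :=
  extrair_nome_abreviado_raises.2.2.2
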